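-- pv_equiv track=rewrite | github.com/chowdhurysujan71/finbrain-backup--25th-Sep-2025 | utils/expense_ambiguity.py | _clean_item_text
-- ===== SOURCE A (Python) =====
-- def _clean_item_text(text: str) -> str:
--     """Clean and normalize item text for matching"""
--     # Extract the main item word
--     text = text.lower().strip()
--
--     # Remove common expense words
--     remove_words = ['spent', 'bought', 'paid', 'for', 'on', 'the', 'a', 'an']
--     words = text.split()
--     words = [w for w in words if w not in remove_words and not w.isdigit()]
--
--     # Look for the main item (usually a noun)
--     if words:
--         # Return the first non-trivial word
--         for word in words:
--             if len(word) > 2:  # Skip very short words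
--                 return word
--
--     return text
-- ===== SOURCE B (Python) =====
-- def _clean_item_text(text: str) -> str:
--     """Clean and normalize item text for matching.
--
--     Character-level streaming tokenizer: walk the normalized text once,
--     accumulating the current word; at each whitespace boundary test the
--     finished word and return it immediately if it qualifies. No split(),
--     no intermediate word list.
--     """
--     text = text.lower().strip()
--     remove_words = ('spent', 'bought', 'paid', 'for', 'on', 'the', 'a', 'an')
--     word = ''
--     for ch in text + ' ':  # sentinel space flushes the final word
--         if ch.isspace():
--             if word not in remove_words and not word.isdigit() and len(word) > 2:
--                 return word
--             word = ''
--         else: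
--             word += ch
--     return text
-- ===== Notes on version B (the rewrite author's own statement) =====
-- stated objective: alternative
-- what changed: Replaces split-into-a-word-list + filter pass + rescan-for-first-long-word by a single character-level streaming tokenizer: one pass over the normalized text accumulating the current word and testing it (stopword, digit, length) at each whitespace boundary, returning immediately; no word list is ever built.
import Mathlib
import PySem

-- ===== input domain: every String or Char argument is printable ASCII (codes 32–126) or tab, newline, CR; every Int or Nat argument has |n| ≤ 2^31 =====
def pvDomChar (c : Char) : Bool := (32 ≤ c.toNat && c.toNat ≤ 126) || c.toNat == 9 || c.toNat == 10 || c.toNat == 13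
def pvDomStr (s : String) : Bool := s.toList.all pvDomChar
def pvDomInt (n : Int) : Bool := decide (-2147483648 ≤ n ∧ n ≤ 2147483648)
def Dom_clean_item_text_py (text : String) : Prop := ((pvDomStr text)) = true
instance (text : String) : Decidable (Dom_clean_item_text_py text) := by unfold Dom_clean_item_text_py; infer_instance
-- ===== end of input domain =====

-- B replaces A's split-into-a-word-list + filter + rescan by a single character-level
-- streaming tokenizer that tests each word at its whitespace boundary (simpler traversal).

-- ===== PORT A =====
def removeWordsA : List String :=
  ["spent", "bought", "paid", "for", "on", "the", "a", "an"]

-- A's 'for word in words: if len(word) > 2: return word' loop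
def firstLongA : List String → Option String
  | [] => none
  | w :: ws => if 2 < PySem.Str.len w then some w else firstLongA ws

def clean_item_text_py (text : String) : String :=
  let t := PySem.Str.lower (PySem.Str.strip text)
  let words := PySem.Str.split₀ t
  let words := words.filter
    (fun w => !(removeWordsA.contains w) && !(PySem.Str.strIsdigit w))
  if !words.isEmpty then
    match firstLongA words with
    | some w => w
    | none => t
  else t

-- ===== PORT B =====
def removeWordsB : List String :=
  ["spent", "bought", "paid", "for", "on", "the", "a", "an"]

-- the word test B applies at each whitespace boundary (word kept as its chars, joined to test)
def goodB (cs : List Char) : Bool :=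
  let w := String.ofList cs
  !(removeWordsB.contains w) && !(PySem.Str.strIsdigit w)
    && decide (2 < PySem.Str.len w)

-- B's 'for ch in text + " "' loop: cur is the word accumulated so far
def scanB : List Char → List Char → Option (List Char)
  | [], _ => none
  | c :: rest, cur =>
    if PySem.Chars.isspace c then
      if goodB cur then some cur else scanB rest []
    else scanB rest (cur ++ [c])

def clean_item_text_py_alt (text : String) : String :=
  let t := PySem.Str.lower (PySem.Str.strip text)
  match scanB (t.toList ++ [' ']) [] with
  | some w => String.ofList w
  | none => t

-- ===== PRECONDITION & SPEC =====
def Spec_clean_item_text_py (text : String) (out : String) : Prop := out = clean_item_text_py_alt text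
instance (text : String) (out : String) : Decidable (Spec_clean_item_text_py text out) := by unfold Spec_clean_item_text_py; infer_instance

-- ===== CLAIM (what is proved, stated in full; the proofs are below) =====
def Claim_equal_clean_item_text_py : Prop := ∀ (text : String), Dom_clean_item_text_py text → Spec_clean_item_text_py text (clean_item_text_py text)

-- ===== LEMMAS AND PROOFS =====

-- A's scan of the filtered list for the first long word is a single find?
theorem firstLongA_filter (q : String → Bool) (xs : List String) :
    firstLongA (xs.filter q)
      = xs.find? (fun w => q w && decide (2 < PySem.Str.len w)) := by
  induction xs with
  | nil => rfl
  | cons w ws ih =>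
    by_cases hq : q w <;> by_cases hl : 2 < w.length <;>
      simp [firstLongA, hq, hl, ih]

-- unfolding equations for split₀.go
theorem go_nil (cur : List Char) (acc : List (List Char)) :
    PySem.Chars.split₀.go [] cur acc
      = if cur.isEmpty then acc.reverse else (cur.reverse :: acc).reverse := rfl

theorem go_cons (c : Char) (rest cur : List Char) (acc : List (List Char)) :
    PySem.Chars.split₀.go (c :: rest) cur acc
      = if PySem.Chars.isspace c then
          (if cur.isEmpty then PySem.Chars.split₀.go rest [] acc
           else PySem.Chars.split₀.go rest [] (cur.reverse :: acc))
        else PySem.Chars.split₀.go rest (c :: cur) acc := rfl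

-- accumulator lemma for split₀.go
theorem split₀_go_acc (rest : List Char) (cur : List Char) (acc : List (List Char)) :
    PySem.Chars.split₀.go rest cur acc = acc.reverse ++ PySem.Chars.split₀.go rest cur [] := by
  induction rest generalizing cur acc with
  | nil =>
    rw [go_nil, go_nil]
    by_cases h : cur.isEmpty <;> simp [h]
  | cons c rest ih =>
    rw [go_cons, go_cons]
    by_cases hs : PySem.Chars.isspace c
    · by_cases h : cur.isEmpty
      · simp only [hs, h, if_true]
        exact ih [] acc
      · simp only [hs, h, if_true]
        rw [ih [] (cur.reverse :: acc), ih [] [cur.reverse]]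
        simp
    · simp only [hs]
      exact ih (c :: cur) acc

-- goodB rejects the empty word
theorem goodB_nil : goodB [] = false := by decide

theorem isspace_space : PySem.Chars.isspace ' ' = true := by decide

-- B's streaming scan finds exactly the first split₀ word passing goodB
theorem scanB_eq_find? (rest : List Char) (cur : List Char) :
    scanB (rest ++ [' ']) cur
      = (PySem.Chars.split₀.go rest cur.reverse []).find? goodB := by
  induction rest generalizing cur with
  | nil =>
    rw [List.nil_append, go_nil]
    by_cases h : cur = []
    · subst h; simp [scanB, isspace_space, goodB_nil]
    · have h' : cur.reverse.isEmpty = false := by simpa using h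
      by_cases hg : goodB cur <;>
        simp [scanB, isspace_space, h', hg, List.find?]
  | cons c rest ih =>
    rw [List.cons_append, go_cons]
    by_cases hs : PySem.Chars.isspace c
    · by_cases h : cur = []
      · subst h
        simpa [scanB, hs, goodB_nil] using ih []
      · have h' : cur.reverse.isEmpty = false := by simpa using h
        simp only [hs, h', if_true, Bool.false_eq_true, if_false, List.reverse_reverse]
        rw [split₀_go_acc rest [] [cur]]
        by_cases hg : goodB cur
        · simp [scanB, hs, hg]
        · simpa [scanB, hs, hg, List.find?] using ih []
    · simp only [hs]
      simpa [scanB, hs] using ih (cur ++ [c])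

-- ===== VERDICT (by name: the statement is the Claim_ definition above) =====
theorem clean_item_text_py_spec : Claim_equal_clean_item_text_py := by
  intro text _
  unfold Spec_clean_item_text_py
  simp only [clean_item_text_py, clean_item_text_py_alt]
  rw [firstLongA_filter]
  set t := PySem.Str.lower (PySem.Str.strip text)
  have hB : scanB (t.toList ++ [' ']) []
      = (PySem.Chars.split₀ t.toList).find? goodB := by
    simpa [PySem.Chars.split₀] using scanB_eq_find? t.toList []
  have hsplit : PySem.Str.split₀ t = (PySem.Chars.split₀ t.toList).map String.ofList := rfl
  have hfindmap :
      (PySem.Str.split₀ t).find?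
        (fun w => (!removeWordsA.contains w && !PySem.Str.strIsdigit w)
          && decide (2 < PySem.Str.len w))
      = ((PySem.Chars.split₀ t.toList).find? goodB).map String.ofList := by
    rw [hsplit, List.find?_map]
    rfl
  rw [hB]
  cases hf : (PySem.Chars.split₀ t.toList).find? goodB with
  | none =>
    have : (PySem.Str.split₀ t).find?
        (fun w => (!removeWordsA.contains w && !PySem.Str.strIsdigit w)
          && decide (2 < PySem.Str.len w)) = none := by rw [hfindmap, hf]; rfl
    rw [this]
    split_ifs <;> rfl
  | some w =>
    have hsome : (PySem.Str.split₀ t).find?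
        (fun w => (!removeWordsA.contains w && !PySem.Str.strIsdigit w)
          && decide (2 < PySem.Str.len w)) = some (String.ofList w) := by
      rw [hfindmap, hf]; rfl
    have hfil : ((PySem.Str.split₀ t).filter
        (fun w => !removeWordsA.contains w && !PySem.Str.strIsdigit w)).isEmpty = false := by
      cases hemp : ((PySem.Str.split₀ t).filter
          (fun w => !removeWordsA.contains w && !PySem.Str.strIsdigit w)).isEmpty
      · rfl
      · exfalso
        rw [List.isEmpty_iff] at hemp
        have h2 := firstLongA_filter
          (fun w => !removeWordsA.contains w && !PySem.Str.strIsdigit w) (PySem.Str.split₀ t)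
        rw [hemp, hsome] at h2
        simp [firstLongA] at h2
    rw [hsome, hfil]
    rfl
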